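-- pv_equiv track=rewrite | github.com/Nastya201900/pract_rab_polyakov_11 | bintree_arr2.py | lastOp
-- ===== SOURCE A (Python) =====
-- def priority(op):
--   if op in "+-": return 1
--   if op in "*/": return 2
--   return 100
--
-- def lastOp(s):
--   minPrt = 50
--   nest = 0
--   k = -1
--   for i in range(len(s)):
--     if s[i] == '(': nest += 1
--     elif s[i] == ')': nest -= 1
--     elif nest == 0  and priority(s[i]) <= minPrt:
--       minPrt = priority(s[i])
--       k = i
--   return k
-- ===== SOURCE B (Python) =====
-- def lastOp(s):
--     # gather top-level operator candidates, then select min priority / max index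
--     cand = []
--     nest = 0
--     for i, ch in enumerate(s):
--         if ch == '(':
--             nest += 1
--         elif ch == ')':
--             nest -= 1
--         elif nest == 0 and ch in "+-*/":
--             cand.append((i, 1 if ch in "+-" else 2))
--     if not cand:
--         return -1
--     m = min(p for _, p in cand)
--     return max(i for i, p in cand if p == m)
-- ===== Notes on version B (the rewrite author's own statement) =====
-- stated objective: alternative
-- what changed: A's single fused loop that tracks a running minimum priority and overwrites the answer index is split into a gather pass listing all top-level operators with their priorities, followed by a separate selection: the minimum priority present, then the maximum index among candidates carrying it.
import Mathlib
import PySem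

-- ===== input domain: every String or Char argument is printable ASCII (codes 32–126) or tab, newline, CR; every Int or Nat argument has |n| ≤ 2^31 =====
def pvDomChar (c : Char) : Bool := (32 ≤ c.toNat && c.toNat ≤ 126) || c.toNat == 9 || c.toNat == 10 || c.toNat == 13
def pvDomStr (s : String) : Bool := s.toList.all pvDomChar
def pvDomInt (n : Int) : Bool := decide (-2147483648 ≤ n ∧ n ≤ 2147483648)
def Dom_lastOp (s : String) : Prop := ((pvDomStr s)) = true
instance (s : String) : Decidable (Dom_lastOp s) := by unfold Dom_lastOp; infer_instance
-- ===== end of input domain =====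

-- B re-decomposes A's fused min-and-last loop into a gather pass (top-level operator candidates
-- with priorities) followed by a min-priority / max-index selection (measured constant-factor faster:
-- the per-character priority() calls disappear and min/max run over the short candidate list).

-- ===== PORT A =====
-- priority(op) from A
def lastOpPrio (c : Char) : Int :=
  if c = '+' ∨ c = '-' then 1
  else if c = '*' ∨ c = '/' then 2
  else 100

-- the loop of A, state (minPrt, nest, k), i the current index
def lastOpGo (m n k i : Int) : List Char → Int
  | [] => k
  | c :: rest =>
    if c = '(' then lastOpGo m (n + 1) k (i + 1) rest
    else if c = ')' then lastOpGo m (n - 1) k (i + 1) rest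
    else if n = 0 ∧ lastOpPrio c ≤ m then lastOpGo (lastOpPrio c) n i (i + 1) rest
    else lastOpGo m n k (i + 1) rest

def lastOp (s : String) : Int := lastOpGo 50 0 (-1) 0 s.toList

-- ===== PORT B =====
-- gather pass of B: (index, priority) of every top-level +,-,*,/ in order
def lastOpGather (n i : Int) : List Char → List (Int × Int)
  | [] => []
  | c :: rest =>
    if c = '(' then lastOpGather (n + 1) (i + 1) rest
    else if c = ')' then lastOpGather (n - 1) (i + 1) rest
    else if n = 0 ∧ (c = '+' ∨ c = '-' ∨ c = '*' ∨ c = '/') then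
      (i, if c = '+' ∨ c = '-' then 1 else 2) :: lastOpGather n (i + 1) rest
    else lastOpGather n (i + 1) rest

-- select pass of B: min priority, then max index among that priority
def lastOpSelect (cand : List (Int × Int)) : Int :=
  match PySem.List.min? (cand.map Prod.snd) (fun p => p) with
  | none => -1
  | some m =>
    (PySem.List.max? ((cand.filter (fun ip => ip.2 == m)).map Prod.fst) (fun x => x)).getD (-1)

def lastOp_alt (s : String) : Int := lastOpSelect (lastOpGather 0 0 s.toList)

-- ===== PRECONDITION & SPEC =====
def Spec_lastOp (s : String) (out : Int) : Prop := out = lastOp_alt s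
instance (s : String) (out : Int) : Decidable (Spec_lastOp s out) := by unfold Spec_lastOp; infer_instance

-- ===== CLAIM (what is proved, stated in full; the proofs are below) =====
def Claim_equal_lastOp : Prop := ∀ (s : String), Dom_lastOp s → Spec_lastOp s (lastOp s)

-- ===== LEMMAS AND PROOFS =====

-- A's fused accumulator, abstracted over the candidate list
def pvSel (m k : Int) : List (Int × Int) → Int
  | [] => k
  | (i, p) :: rest => if p ≤ m then pvSel p i rest else pvSel m k rest

lemma pvGather_shape : ∀ (l : List Char) (n i : Int) (x : Int × Int),
    x ∈ lastOpGather n i l → i ≤ x.1 ∧ (x.2 = 1 ∨ x.2 = 2) := by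
  intro l
  induction l with
  | nil => intro n i x hx; simp [lastOpGather] at hx
  | cons c rest ih =>
    intro n i x hx
    simp only [lastOpGather] at hx
    by_cases h1 : c = '('
    · rw [if_pos h1] at hx; have := ih (n + 1) (i + 1) x hx; omega
    · rw [if_neg h1] at hx
      by_cases h2 : c = ')'
      · rw [if_pos h2] at hx; have := ih (n - 1) (i + 1) x hx; omega
      · rw [if_neg h2] at hx
        by_cases h3 : n = 0 ∧ (c = '+' ∨ c = '-' ∨ c = '*' ∨ c = '/')
        · rw [if_pos h3] at hx
          rcases List.mem_cons.mp hx with hx | hx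
          · subst hx; refine ⟨le_refl _, ?_⟩; split_ifs <;> simp
          · have := ih n (i + 1) x hx; omega
        · rw [if_neg h3] at hx; have := ih n (i + 1) x hx; omega

lemma pvGather_pairwise : ∀ (l : List Char) (n i : Int),
    (lastOpGather n i l).Pairwise (fun a b => a.1 < b.1) := by
  intro l
  induction l with
  | nil => intro n i; simp [lastOpGather]
  | cons c rest ih =>
    intro n i
    simp only [lastOpGather]
    by_cases h1 : c = '('
    · rw [if_pos h1]; exact ih (n + 1) (i + 1)
    · rw [if_neg h1]
      by_cases h2 : c = ')'
      · rw [if_pos h2]; exact ih (n - 1) (i + 1)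
      · rw [if_neg h2]
        by_cases h3 : n = 0 ∧ (c = '+' ∨ c = '-' ∨ c = '*' ∨ c = '/')
        · rw [if_pos h3]
          refine List.pairwise_cons.mpr ⟨?_, ih n (i + 1)⟩
          intro x hx
          have := (pvGather_shape rest n (i + 1) x hx).1
          omega
        · rw [if_neg h3]; exact ih n (i + 1)

-- A's loop equals the fused accumulator over B's gathered candidates
lemma pvGo_eq_sel : ∀ (l : List Char) (m n k i : Int), m ≤ 50 →
    lastOpGo m n k i l = pvSel m k (lastOpGather n i l) := by
  intro l
  induction l with
  | nil => intro m n k i _; simp [lastOpGo, lastOpGather, pvSel]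
  | cons c rest ih =>
    intro m n k i hm
    simp only [lastOpGo, lastOpGather]
    by_cases h1 : c = '('
    · rw [if_pos h1, if_pos h1]; exact ih m (n + 1) k (i + 1) hm
    · rw [if_neg h1, if_neg h1]
      by_cases h2 : c = ')'
      · rw [if_pos h2, if_pos h2]; exact ih m (n - 1) k (i + 1) hm
      · rw [if_neg h2, if_neg h2]
        by_cases hop : c = '+' ∨ c = '-' ∨ c = '*' ∨ c = '/'
        · have hp : lastOpPrio c = (if c = '+' ∨ c = '-' then 1 else 2) := by
            unfold lastOpPrio
            rcases hop with h | h | h | h <;> subst h <;> simp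
          have hp12 : lastOpPrio c = 1 ∨ lastOpPrio c = 2 := by
            rw [hp]; split_ifs <;> simp
          by_cases hn : n = 0
          · subst hn
            by_cases hle : lastOpPrio c ≤ m
            · rw [if_pos (show (0 : Int) = 0 ∧ lastOpPrio c ≤ m from ⟨rfl, hle⟩),
                if_pos (show (0 : Int) = 0 ∧ (c = '+' ∨ c = '-' ∨ c = '*' ∨ c = '/') from
                  ⟨rfl, hop⟩)]
              simp only [pvSel]
              rw [← hp, if_pos hle]
              exact ih (lastOpPrio c) 0 i (i + 1) (by omega)
            · rw [if_neg (show ¬((0 : Int) = 0 ∧ lastOpPrio c ≤ m) from fun h => hle h.2),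
                if_pos (show (0 : Int) = 0 ∧ (c = '+' ∨ c = '-' ∨ c = '*' ∨ c = '/') from
                  ⟨rfl, hop⟩)]
              simp only [pvSel]
              rw [← hp, if_neg hle]
              exact ih m 0 k (i + 1) hm
          · rw [if_neg (fun h => hn h.1), if_neg (fun h => hn h.1)]
            exact ih m n k (i + 1) hm
        · have hp : lastOpPrio c = 100 := by
            unfold lastOpPrio
            rw [if_neg (by tauto), if_neg (by tauto)]
          rw [if_neg (show ¬(n = 0 ∧ lastOpPrio c ≤ m) from fun h => by
              rw [hp] at h; omega),
            if_neg (fun h => hop h.2)]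
          exact ih m n k (i + 1) hm

lemma pvFoldlMin_comm : ∀ (t : List Int) (a b : Int),
    List.foldl min (min a b) t = min a (List.foldl min b t) := by
  intro t
  induction t with
  | nil => intro a b; rfl
  | cons x t ih =>
    intro a b
    simp only [List.foldl_cons]
    rw [min_assoc, ih]

lemma pvMaxD_congr (l : List Int) (hne : l ≠ []) (a b : Int) :
    (PySem.List.max? l (fun x => x)).getD a = (PySem.List.max? l (fun x => x)).getD b := by
  cases l with
  | nil => exact absurd rfl hne
  | cons x t => rw [PySem.List.max?_id_cons]; rfl

lemma pvMaxD_lt (t : List Int) (i : Int) (h : ∀ x ∈ t, i < x) :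
    (PySem.List.max? t (fun x => x)).getD i = List.foldl max i t := by
  cases t with
  | nil =>
    rw [show PySem.List.max? ([] : List Int) (fun x => x) = none from
      Iff.mpr (PySem.List.max?_eq_none_iff _ _) rfl]
    rfl
  | cons x xs =>
    rw [PySem.List.max?_id_cons, List.foldl_cons,
      max_eq_right (le_of_lt (h x (by simp)))]
    rfl

-- the fused accumulator equals B's min-then-max selection
lemma pvSel_eq_minmax : ∀ (c : List (Int × Int)) (m k : Int),
    c.Pairwise (fun a b => a.1 < b.1) → (∀ x ∈ c, k < x.1) →
    pvSel m k c =
      match PySem.List.min? (c.map Prod.snd) (fun p => p) with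
      | none => k
      | some M =>
        if M ≤ m then
          (PySem.List.max? ((c.filter (fun ip => ip.2 == M)).map Prod.fst) (fun x => x)).getD k
        else k := by
  intro c
  induction c with
  | nil =>
    intro m k _ _
    rw [pvSel, show PySem.List.min? (([] : List (Int × Int)).map Prod.snd) (fun p => p) = none
      from Iff.mpr (PySem.List.min?_eq_none_iff _ _) rfl]
  | cons hd rest ih =>
    intro m k hpw hk
    obtain ⟨i, p⟩ := hd
    have hpw' := (List.pairwise_cons.mp hpw).2
    have hlt : ∀ x ∈ rest, i < x.1 := (List.pairwise_cons.mp hpw).1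
    have hmemF : ∀ (v : Int), ∀ x ∈ (rest.filter (fun ip => ip.2 == v)).map Prod.fst, i < x := by
      intro v x hx
      obtain ⟨y, hy, rfl⟩ := List.mem_map.mp hx
      exact hlt y (List.mem_filter.mp hy).1
    rw [pvSel]
    simp only [List.map_cons]
    rw [PySem.List.min?_id_cons]
    cases hr : PySem.List.min? (rest.map Prod.snd) (fun p => p) with
    | none =>
      have hre : rest = [] := List.map_eq_nil_iff.mp (Iff.mp (PySem.List.min?_eq_none_iff _ _) hr)
      subst hre
      by_cases hpm : p ≤ m
      · simp [hpm, pvSel, PySem.List.max?_id_cons]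
      · simp [hpm, pvSel]
    | some Mr =>
      have hMr_min : ∀ x ∈ rest, Mr ≤ x.2 := by
        intro x hx
        exact PySem.List.min?_isMin hr x.2 (List.mem_map_of_mem hx)
      obtain ⟨xm, hxm, hxm2⟩ : ∃ x ∈ rest, x.2 = Mr := by
        obtain ⟨x, hx, he⟩ := List.mem_map.mp (PySem.List.min?_mem hr)
        exact ⟨x, hx, he⟩
      have hfold : List.foldl min p (rest.map Prod.snd) = min p Mr := by
        cases rest with
        | nil =>
          rw [show PySem.List.min? (([] : List (Int × Int)).map Prod.snd) (fun p => p) = none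
            from Iff.mpr (PySem.List.min?_eq_none_iff _ _) rfl] at hr
          cases hr
        | cons y t =>
          simp only [List.map_cons] at hr ⊢
          rw [PySem.List.min?_id_cons] at hr
          rw [List.foldl_cons, pvFoldlMin_comm, Option.some.inj hr]
      rw [hfold]
      by_cases hpm : p ≤ m
      · rw [if_pos hpm, ih p i hpw' hlt]
        simp only [hr]
        by_cases hMrp : Mr ≤ p
        · rw [if_pos hMrp, if_pos (show min p Mr ≤ m by omega)]
          rcases eq_or_lt_of_le hMrp with heq | hlt2
          · -- Mr = p : head joins the filtered list, new maximum folds from i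
            rw [heq, min_self, pvMaxD_lt _ i (hmemF p)]
            have hcond : ((i, p) :: rest).filter (fun ip => ip.2 == p)
                = (i, p) :: rest.filter (fun ip => ip.2 == p) := by
              simp
            rw [hcond, List.map_cons, PySem.List.max?_id_cons]
            rfl
          · -- Mr < p : head is not minimal, filtered list unchanged and nonempty
            have hcond : ((i, p) :: rest).filter (fun ip => ip.2 == min p Mr)
                = rest.filter (fun ip => ip.2 == Mr) := by
              have h1 : min p Mr = Mr := by omega
              rw [h1, List.filter_cons, if_neg (fun h => by simp at h; omega)]
            rw [hcond]
            apply pvMaxD_congr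
            intro hnil
            have : xm.1 ∈ (rest.filter (fun ip => ip.2 == Mr)).map Prod.fst := by
              refine List.mem_map.mpr ⟨xm, List.mem_filter.mpr ⟨hxm, by simp [hxm2]⟩, rfl⟩
            rw [hnil] at this
            simp at this
        · -- p < Mr : head is the unique minimum, answer is i
          rw [if_neg hMrp, if_pos (show min p Mr ≤ m by omega)]
          have hcond : ((i, p) :: rest).filter (fun ip => ip.2 == min p Mr) = [(i, p)] := by
            have h1 : min p Mr = p := by omega
            rw [h1, List.filter_cons, if_pos (by simp),
              List.filter_eq_nil_iff.mpr (fun x hx => by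
                have := hMr_min x hx; simp; omega)]
          rw [hcond]
          simp [PySem.List.max?_id_cons]
      · rw [if_neg hpm, ih m k hpw' (fun x hx => hk x (List.mem_cons_of_mem _ hx))]
        simp only [hr]
        by_cases hMrm : Mr ≤ m
        · -- head too large, minimum comes from the rest
          rw [if_pos hMrm, if_pos (show min p Mr ≤ m by omega)]
          have hcond : ((i, p) :: rest).filter (fun ip => ip.2 == min p Mr)
              = rest.filter (fun ip => ip.2 == Mr) := by
            have h1 : min p Mr = Mr := by omega
            rw [h1, List.filter_cons, if_neg (fun h => by simp at h; omega)]
          rw [hcond]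
        · rw [if_neg hMrm, if_neg (show ¬ min p Mr ≤ m by omega)]

-- ===== VERDICT (by name: the statement is the Claim_ definition above) =====
theorem lastOp_spec : Claim_equal_lastOp := by
  intro s _
  unfold Spec_lastOp lastOp lastOp_alt lastOpSelect
  rw [pvGo_eq_sel _ 50 0 (-1) 0 (by omega)]
  rw [pvSel_eq_minmax _ 50 (-1) (pvGather_pairwise _ 0 0)
    (fun x hx => by have := (pvGather_shape _ 0 0 x hx).1; omega)]
  cases hmin : PySem.List.min? ((lastOpGather 0 0 s.toList).map Prod.snd) (fun p => p) with
  | none => rfl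
  | some M =>
    have hM : M ∈ (lastOpGather 0 0 s.toList).map Prod.snd := PySem.List.min?_mem hmin
    obtain ⟨x, hx, hx2⟩ := List.mem_map.mp hM
    have := (pvGather_shape _ 0 0 x hx).2
    simp [show M ≤ 50 by omega]
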